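-- pv_equiv track=rewrite | github.com/VarunArora14/Personal-Blog-Chatbot | app/pages/Query_Decomposition.py | reciprocalRankFusionSources
-- ===== SOURCE A (Python) =====
-- def reciprocalRankFusionSources(results: list[list], k=60):
--     '''
--     Pass all the sources and sort in order of most occuring sources
--     '''
--     fused_scores = {}
--
--     for sources in results:
--         for rank, source in enumerate(sources):
--             if source not in fused_scores:
--                 fused_scores[source] = 0
--             fused_scores[source] += 1 / (rank + k)
--
--     # No need to send scores for using sources as context
--     reranked_results = [
--         sourceUrl
--         for sourceUrl, score in sorted(fused_scores.items(), key=lambda x: x[1], reverse=True)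
--     ]
--
--     # Return the reranked results as a list of tuples, each containing the document and its fused score
--     return reranked_results[:4] # return top 4 results only
-- ===== SOURCE B (Python) =====
-- def reciprocalRankFusionSources(results: list[list], k=60):
--     scores = {}
--     for sources in results:
--         for rank, source in enumerate(sources):
--             scores[source] = scores.get(source, 0) + 1 / (rank + k)
--     remaining = list(scores.items())
--     top = []
--     while remaining and len(top) < 4:
--         best = max(remaining, key=lambda item: item[1])
--         top.append(best[0])
--         remaining.remove(best)
--     return top
-- ===== Notes on version B (the rewrite author's own statement) =====
-- stated objective: alternative
-- what changed: Replaces the full stable reverse sort plus [:4] slice with a bounded selection loop that repeatedly extracts the first-maximum source (at most 4 rounds), and accumulates scores via dict.get with a default instead of a membership-guarded += .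
import Mathlib
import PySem

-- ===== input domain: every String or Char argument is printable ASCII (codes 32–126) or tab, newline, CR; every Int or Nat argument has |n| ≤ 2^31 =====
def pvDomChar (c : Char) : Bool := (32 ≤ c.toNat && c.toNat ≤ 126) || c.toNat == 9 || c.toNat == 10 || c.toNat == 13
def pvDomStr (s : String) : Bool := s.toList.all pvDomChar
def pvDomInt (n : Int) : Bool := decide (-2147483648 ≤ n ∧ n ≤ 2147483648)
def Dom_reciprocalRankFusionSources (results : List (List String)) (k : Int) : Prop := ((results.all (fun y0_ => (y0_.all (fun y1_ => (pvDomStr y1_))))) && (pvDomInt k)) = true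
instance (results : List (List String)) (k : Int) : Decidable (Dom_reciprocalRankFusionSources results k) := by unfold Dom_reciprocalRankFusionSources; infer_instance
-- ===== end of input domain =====

-- ===== PORT A =====
-- A: nested-loop RRF accumulation into a dict, then full stable reverse sort by score, map to urls, slice [:4].
-- Scores 1/(rank+k) are modelled exactly as rationals (ℚ); Pre_ excludes the ZeroDivisionError inputs.
def reciprocalRankFusionSources (results : List (List String)) (k : Int) : List String :=
  let fused_scores : PySem.Dict String ℚ :=
    results.foldl (fun d sources =>
      (PySem.List.enumerate sources).foldl (fun d p =>
        let d' := if (PySem.Dict.get? d p.2).isNone then PySem.Dict.insert d p.2 0 else d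
        PySem.Dict.insert d' p.2 (PySem.Dict.getD d' p.2 0 + 1 / ((p.1 : ℚ) + (k : ℚ)))) d)
      (PySem.Dict.mk [])
  let reranked_results :=
    (PySem.List.sorted fused_scores.items (fun x => x.2) true).map (fun x => x.1)
  PySem.List.slice reranked_results none (some 4)

-- ===== PORT B =====
-- B: same scores via dict.get accumulation, then repeated first-max extraction (at most 4 rounds).
def selTop : Nat -> List (String × ℚ) -> List String
  | 0, _ => []
  | c+1, remaining =>
    match PySem.List.max? remaining (fun it => it.2) with
    | none => []
    | some best => best.1 :: selTop c ((PySem.List.remove? remaining best).getD remaining)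

def reciprocalRankFusionSources_alt (results : List (List String)) (k : Int) : List String :=
  let scores : PySem.Dict String ℚ :=
    results.foldl (fun d sources =>
      (PySem.List.enumerate sources).foldl (fun d p =>
        PySem.Dict.insert d p.2 (PySem.Dict.getD d p.2 0 + 1 / ((p.1 : ℚ) + (k : ℚ)))) d)
      (PySem.Dict.mk [])
  selTop 4 scores.items

-- ===== PRECONDITION & SPEC =====
-- Pre_ excludes exactly the inputs where Python raises ZeroDivisionError: some row has an index
-- rank with rank + k = 0 (i.e. 0 <= -k < row length); both Pythons raise there.
def Pre_reciprocalRankFusionSources (results : List (List String)) (k : Int) : Prop :=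
  ∀ l ∈ results, 0 < k ∨ (l.length : Int) ≤ -k
instance (results : List (List String)) (k : Int) : Decidable (Pre_reciprocalRankFusionSources results k) := by unfold Pre_reciprocalRankFusionSources; infer_instance
def pvWitness_reciprocalRankFusionSources : List (List String) × Int := ([["a", "b"], ["b"]], 60)

def Spec_reciprocalRankFusionSources (results : List (List String)) (k : Int) (out : List String) : Prop := out = reciprocalRankFusionSources_alt results k
instance (results : List (List String)) (k : Int) (out : List String) : Decidable (Spec_reciprocalRankFusionSources results k out) := by unfold Spec_reciprocalRankFusionSources; infer_instance

-- ===== CLAIM (what is proved, stated in full; the proofs are below) =====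
def Claim_equal_reciprocalRankFusionSources : Prop := ∀ (results : List (List String)) (k : Int), Dom_reciprocalRankFusionSources results k → Pre_reciprocalRankFusionSources results k → Spec_reciprocalRankFusionSources results k (reciprocalRankFusionSources results k)

-- ===== LEMMAS AND PROOFS =====

-- sorted over a snoc is one insertBy step (insertion sort reading the list left to right)
lemma pvSorted_snoc (xs : List (String × ℚ)) (x : String × ℚ) :
    PySem.List.sorted (xs ++ [x]) (fun p => p.2) true =
      PySem.List.insertBy (fun a b => decide (b.2 < a.2)) x
        (PySem.List.sorted xs (fun p => p.2) true) := by
  simp [PySem.List.sorted, List.foldl_append]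

lemma pvMax?_snoc_none (xs : List (String × ℚ)) (x : String × ℚ)
    (h : PySem.List.max? xs (fun p => p.2) = none) :
    PySem.List.max? (xs ++ [x]) (fun p => p.2) = some x := by
  unfold PySem.List.max? at h ⊢
  rw [List.foldl_append, h]
  rfl

lemma pvMax?_snoc_some (xs : List (String × ℚ)) (x m : String × ℚ)
    (h : PySem.List.max? xs (fun p => p.2) = some m) :
    PySem.List.max? (xs ++ [x]) (fun p => p.2) =
      if m.2 < x.2 then some x else some m := by
  unfold PySem.List.max? at h ⊢
  rw [List.foldl_append, h]
  rfl

lemma pvRemove_snoc_mem (xs : List (String × ℚ)) (x v : String × ℚ) (hv : v ∈ xs) :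
    (PySem.List.remove? (xs ++ [x]) v).getD [] = (PySem.List.remove? xs v).getD [] ++ [x] := by
  obtain ⟨i, hi⟩ := Option.isSome_iff_exists.mp (List.isSome_idxOf?.mpr hv)
  obtain ⟨hlt, hgex, hmin⟩ := List.idxOf?_eq_some_iff.mp hi
  have hi' : List.idxOf? v (xs ++ [x]) = some i := by
    refine List.idxOf?_eq_some_iff.mpr ⟨by simp; omega, ?_, ?_⟩
    · rwa [List.getElem_append_left hlt]
    · intro j hj
      rw [List.getElem_append_left (lt_trans hj hlt)]
      exact hmin j hj
  simp only [PySem.List.remove?, hi, hi', Option.map_some, Option.getD_some]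
  exact List.eraseIdx_append_of_lt_length hlt _

lemma pvRemove_snoc_self (xs : List (String × ℚ)) (x : String × ℚ) (hx : x ∉ xs) :
    (PySem.List.remove? (xs ++ [x]) x).getD [] = xs := by
  have hi : List.idxOf? x (xs ++ [x]) = some xs.length := by
    refine List.idxOf?_eq_some_iff.mpr ⟨by simp, by simp, ?_⟩
    intro j hj
    rw [List.getElem_append_left hj]
    exact fun h => hx (h ▸ List.getElem_mem hj)
  simp only [PySem.List.remove?, hi, Option.map_some, Option.getD_some]
  rw [List.eraseIdx_append_of_length_le (le_refl _)]
  simp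

-- the head of Python's stable reverse sort is the FIRST maximum, and the tail is the
-- stable reverse sort of the list with that first maximum removed
lemma pvSortedHead (xs : List (String × ℚ)) (m : String × ℚ)
    (hm : PySem.List.max? xs (fun p => p.2) = some m) :
    PySem.List.sorted xs (fun p => p.2) true =
      m :: PySem.List.sorted ((PySem.List.remove? xs m).getD []) (fun p => p.2) true := by
  induction xs using List.reverseRecOn generalizing m with
  | nil => simp [PySem.List.max?] at hm
  | append_singleton xs x ih =>
    cases hmx : PySem.List.max? xs (fun p => p.2) with
    | none =>
      have hxs : xs = [] := (PySem.List.max?_eq_none_iff _ _).mp hmx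
      subst hxs
      rw [pvMax?_snoc_none [] x hmx] at hm
      cases hm
      simp [PySem.List.sorted, PySem.List.insertBy, PySem.List.remove?]
    | some m0 =>
      rw [pvMax?_snoc_some xs x m0 hmx] at hm
      by_cases hlt : m0.2 < x.2
      · rw [if_pos hlt] at hm
        obtain rfl : x = m := Option.some.inj hm
        have hub : ∀ y ∈ xs, y.2 ≤ m0.2 := PySem.List.max?_isMax hmx
        have hnm : x ∉ xs := fun hmem => absurd (lt_of_le_of_lt (hub x hmem) hlt) (lt_irrefl _)
        rw [pvSorted_snoc, pvRemove_snoc_self xs x hnm]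
        cases hs : PySem.List.sorted xs (fun p => p.2) true with
        | nil => simp [PySem.List.insertBy]
        | cons y ys =>
          have hy : y ∈ xs := (PySem.List.mem_sorted _ _ _ _).mp (hs ▸ List.mem_cons_self)
          have hyx : y.2 < x.2 := lt_of_le_of_lt (hub y hy) hlt
          simp [PySem.List.insertBy, hyx]
      · rw [if_neg hlt] at hm
        obtain rfl : m0 = m := Option.some.inj hm
        rw [pvSorted_snoc, ih m0 hmx,
          pvRemove_snoc_mem xs x m0 (PySem.List.max?_mem hmx), pvSorted_snoc]
        simp [PySem.List.insertBy, hlt]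

lemma pvSelTop_succ (c : Nat) (xs : List (String × ℚ)) (m : String × ℚ)
    (hm : PySem.List.max? xs (fun it => it.2) = some m) :
    selTop (c + 1) xs = m.1 :: selTop c ((PySem.List.remove? xs m).getD xs) := by
  rw [selTop]
  split
  · rename_i h
    rw [h] at hm
    cases hm
  · rename_i best h
    rw [h] at hm
    cases hm
    rfl

-- B's bounded selection loop is take-c of A's sorted url list
lemma pvSelTop_eq (c : Nat) (xs : List (String × ℚ)) :
    selTop c xs = ((PySem.List.sorted xs (fun p => p.2) true).map (fun p => p.1)).take c := by
  induction c generalizing xs with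
  | zero => simp [selTop]
  | succ c ih =>
    cases hm : PySem.List.max? xs (fun p => p.2) with
    | none =>
      have hxs : xs = [] := (PySem.List.max?_eq_none_iff _ _).mp hm
      subst hxs
      rfl
    | some m =>
      obtain ⟨i, hi⟩ := Option.isSome_iff_exists.mp
        (List.isSome_idxOf?.mpr (PySem.List.max?_mem hm))
      have hl : PySem.List.remove? xs m = some (xs.eraseIdx i) := by
        simp [PySem.List.remove?, hi]
      rw [pvSelTop_succ c xs m hm, pvSortedHead xs m hm, hl]
      simp only [Option.getD_some, List.map_cons, List.take_succ_cons, ih]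

-- A's guarded "+=" body equals B's get-with-default body, dict by dict
lemma pvBody_eq (k : Int) (d : PySem.Dict String ℚ) (p : Int × String) :
    (let d' := if (PySem.Dict.get? d p.2).isNone then PySem.Dict.insert d p.2 0 else d
     PySem.Dict.insert d' p.2 (PySem.Dict.getD d' p.2 0 + 1 / ((p.1 : ℚ) + (k : ℚ)))) =
      PySem.Dict.insert d p.2 (PySem.Dict.getD d p.2 0 + 1 / ((p.1 : ℚ) + (k : ℚ))) := by
  cases hg : PySem.Dict.get? d p.2 with
  | some v => rfl
  | none =>
    have hc : PySem.Dict.contains d p.2 = false :=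
      (PySem.Dict.get?_eq_none_iff_contains _ _).mp hg
    have hgd : PySem.Dict.getD d p.2 0 = 0 := by
      simp [PySem.Dict.getD, hg]
    show PySem.Dict.insert (PySem.Dict.insert d p.2 0) p.2
        (PySem.Dict.getD (PySem.Dict.insert d p.2 0) p.2 0 + 1 / ((p.1 : ℚ) + (k : ℚ))) =
      PySem.Dict.insert d p.2 (PySem.Dict.getD d p.2 0 + 1 / ((p.1 : ℚ) + (k : ℚ)))
    rw [PySem.Dict.getD_insert_self, hgd, zero_add]
    apply PySem.Dict.ext
    rw [PySem.Dict.items_insert_of_contains _ _ (PySem.Dict.contains_insert_self d p.2 0),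
      PySem.Dict.items_insert_of_not_contains _ _ hc,
      PySem.Dict.items_insert_of_not_contains _ _ hc]
    rw [List.map_append]
    congr 1
    · refine (List.map_congr_left fun q hq => ?_).trans (List.map_id _)
      have hq1 : (q.1 == p.2) = false := by
        refine beq_eq_false_iff_ne.mpr fun h => ?_
        have hct : PySem.Dict.contains d p.2 = true := by
          simp only [PySem.Dict.contains, List.any_eq_true]
          exact ⟨q, hq, by simp [h]⟩
        simp [hct] at hc
      simp [hq1]
    · simp

-- ===== VERDICT (by name: the statement is the Claim_ definition above) =====
theorem reciprocalRankFusionSources_spec : Claim_equal_reciprocalRankFusionSources := by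
  intro results k _ _
  unfold Spec_reciprocalRankFusionSources
  have hf : (fun (d : PySem.Dict String ℚ) (p : Int × String) =>
      let d' := if (PySem.Dict.get? d p.2).isNone then PySem.Dict.insert d p.2 0 else d
      PySem.Dict.insert d' p.2 (PySem.Dict.getD d' p.2 0 + 1 / ((p.1 : ℚ) + (k : ℚ)))) =
      (fun (d : PySem.Dict String ℚ) (p : Int × String) =>
      PySem.Dict.insert d p.2 (PySem.Dict.getD d p.2 0 + 1 / ((p.1 : ℚ) + (k : ℚ)))) :=
    funext fun d => funext fun p => pvBody_eq k d p
  simp only [reciprocalRankFusionSources, reciprocalRankFusionSources_alt, hf]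
  rw [pvSelTop_eq, PySem.List.slice_to _ (show (0:Int) ≤ 4 by norm_num)]
  rfl
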